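-- pv_equiv track=rewrite | github.com/ABanerjee33/BWSICubeSat | FlightCode/color_id.py | white
-- ===== SOURCE A (Python) =====
-- def white(r, g, b):
--     # Identifies white:
--     rgb_tuple = (r, g, b)
--     colors = {"green": (230, 230, 230), "blue": (230, 230, 230), "white": (250, 250, 250), "red": (230, 230, 230)}
--     manhattan = lambda x,y : abs(x[0] - y[0]) + abs(x[1] - y[1]) + abs(x[2] - y[2])
--     distances = {k: manhattan(v, rgb_tuple) for k, v in colors.items()}
--     color = min(distances, key=distances.get)
--     x = colors[color]
--     if x == (250, 250, 250):
--         return True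
--     return False
-- ===== SOURCE B (Python) =====
-- def white(r, g, b):
--     # Only two distinct reference points exist in the table: white (250,250,250)
--     # and the shared gray (230,230,230) used by green/blue/red. The min-scan with
--     # its first-key tie-break reduces to a strict comparison of the two distances.
--     d_white = abs(r - 250) + abs(g - 250) + abs(b - 250)
--     d_gray = abs(r - 230) + abs(g - 230) + abs(b - 230)
--     return d_white < d_gray
-- ===== Notes on version B (the rewrite author's own statement) =====
-- stated objective: simpler
-- what changed: Replaced the dict table, Manhattan lambda, distances dict and min-over-keys scan by a direct two-point comparison: only two distinct reference points occur in the table (white, and one gray shared by the other three colors), so B computes the two Manhattan distances and returns whether the white one is strictly smaller (strict < reproduces the tie-break to the first dict key).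
import Mathlib
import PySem

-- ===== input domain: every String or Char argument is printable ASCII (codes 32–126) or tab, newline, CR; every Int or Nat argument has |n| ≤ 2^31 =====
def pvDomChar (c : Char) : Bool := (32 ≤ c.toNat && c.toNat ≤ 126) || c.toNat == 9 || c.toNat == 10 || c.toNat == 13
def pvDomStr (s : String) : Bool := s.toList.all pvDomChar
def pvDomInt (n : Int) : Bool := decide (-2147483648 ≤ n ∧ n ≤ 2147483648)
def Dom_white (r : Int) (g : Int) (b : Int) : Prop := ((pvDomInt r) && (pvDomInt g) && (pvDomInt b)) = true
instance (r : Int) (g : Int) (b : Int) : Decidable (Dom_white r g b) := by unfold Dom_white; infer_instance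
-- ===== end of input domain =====

-- B replaces the color table and min-scan by a direct comparison of the two distinct
-- Manhattan distances (white vs the shared gray point); objective: simpler.

-- ===== PORT A =====
def white (r : Int) (g : Int) (b : Int) : Bool :=
  let rgb_tuple : Int × Int × Int := (r, g, b)
  let colors : PySem.Dict String (Int × Int × Int) :=
    PySem.Dict.ofList [("green", (230, 230, 230)), ("blue", (230, 230, 230)),
                       ("white", (250, 250, 250)), ("red", (230, 230, 230))]
  let manhattan : (Int × Int × Int) → (Int × Int × Int) → Int :=
    fun x y => |x.1 - y.1| + |x.2.1 - y.2.1| + |x.2.2 - y.2.2|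
  let distances : PySem.Dict String Int :=
    PySem.Dict.ofList (colors.items.map (fun kv => (kv.1, manhattan kv.2 rgb_tuple)))
  match PySem.List.min? distances.keys (fun k => distances.getD k 0) with
  | none => false  -- unreachable: the dict is nonempty
  | some color =>
    match colors.get? color with
    | some x => if x == ((250 : Int), (250 : Int), (250 : Int)) then true else false
    | none => false  -- unreachable: color is a key of colors

-- ===== PORT B =====
def white_alt (r : Int) (g : Int) (b : Int) : Bool :=
  let d_white := |r - 250| + |g - 250| + |b - 250|
  let d_gray := |r - 230| + |g - 230| + |b - 230|
  decide (d_white < d_gray)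

-- ===== PRECONDITION & SPEC =====
def Spec_white (r : Int) (g : Int) (b : Int) (out : Bool) : Prop := out = white_alt r g b
instance (r : Int) (g : Int) (b : Int) (out : Bool) : Decidable (Spec_white r g b out) := by unfold Spec_white; infer_instance

-- ===== CLAIM (what is proved, stated in full; the proofs are below) =====
def Claim_equal_white : Prop := ∀ (r : Int) (g : Int) (b : Int), Dom_white r g b → Spec_white r g b (white r g b)

-- ===== LEMMAS AND PROOFS =====

-- ===== VERDICT (by name: the statement is the Claim_ definition above) =====
theorem white_spec : Claim_equal_white := by
  intro r g b _
  unfold Spec_white white white_alt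
  by_cases h : |r - 250| + |g - 250| + |b - 250| < |r - 230| + |g - 230| + |b - 230|
  · simp [lt_asymm h, PySem.Dict.ofList, PySem.Dict.update, PySem.Dict.empty,
      PySem.Dict.keys, PySem.Dict.getD, PySem.Dict.get?, PySem.Dict.insert,
      PySem.List.min?, List.find?,
      abs_sub_comm (230 : Int) r, abs_sub_comm (230 : Int) g, abs_sub_comm (230 : Int) b,
      abs_sub_comm (250 : Int) r, abs_sub_comm (250 : Int) g, abs_sub_comm (250 : Int) b, h]
  · simp [PySem.Dict.ofList, PySem.Dict.update, PySem.Dict.empty,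
      PySem.Dict.keys, PySem.Dict.getD, PySem.Dict.get?, PySem.Dict.insert,
      PySem.List.min?, List.find?,
      abs_sub_comm (230 : Int) r, abs_sub_comm (230 : Int) g, abs_sub_comm (230 : Int) b,
      abs_sub_comm (250 : Int) r, abs_sub_comm (250 : Int) g, abs_sub_comm (250 : Int) b, h]
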